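-- pv_equiv track=rewrite | github.com/joaonahmias/ProvaGestaoQualidadedeSoftware | tests/turma.py | disciplinas_a_pagar
-- ===== SOURCE A (Python) =====
-- def disciplinas_a_pagar(lista_aluno,lista_disciplinas):
--     disciplinas_aprovadas =[]
--     resultado=[]
--     for elemento in lista_aluno:
--         if elemento[1]>=7:
--             disciplinas_aprovadas.append(elemento[0])
--     for elemento in lista_disciplinas:
--         if elemento not in disciplinas_aprovadas:
--             resultado.append(elemento)
--     return resultado
-- ===== SOURCE B (Python) =====
-- def disciplinas_a_pagar(lista_aluno, lista_disciplinas):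
--     # No precomputed approved table: decide each discipline by a direct scan
--     # of the student's records for a passing entry of that discipline.
--     return [d for d in lista_disciplinas
--             if not any(a[0] == d and a[1] >= 7 for a in lista_aluno)]
-- ===== Notes on version B (the rewrite author's own statement) =====
-- stated objective: alternative
-- what changed: Drops A's precomputed approved-disciplines list entirely: each discipline is decided by a direct nested scan of lista_aluno for a passing entry of that discipline (filter with an inline any), one comprehension instead of two staged accumulator loops.
import Mathlib
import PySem

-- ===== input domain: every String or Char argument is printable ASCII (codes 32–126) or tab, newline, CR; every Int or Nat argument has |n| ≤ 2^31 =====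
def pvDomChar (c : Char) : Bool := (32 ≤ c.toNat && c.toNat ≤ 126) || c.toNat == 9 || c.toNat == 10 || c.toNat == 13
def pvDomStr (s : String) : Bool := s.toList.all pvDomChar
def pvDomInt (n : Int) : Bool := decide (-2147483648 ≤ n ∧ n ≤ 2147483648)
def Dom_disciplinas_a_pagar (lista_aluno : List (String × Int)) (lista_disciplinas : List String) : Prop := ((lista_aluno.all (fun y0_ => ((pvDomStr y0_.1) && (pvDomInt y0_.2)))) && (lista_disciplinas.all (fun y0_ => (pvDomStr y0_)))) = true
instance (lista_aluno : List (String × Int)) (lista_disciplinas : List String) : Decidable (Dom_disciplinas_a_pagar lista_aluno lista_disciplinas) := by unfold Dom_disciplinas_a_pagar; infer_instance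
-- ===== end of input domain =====

-- ===== PORT A =====
-- B drops A's precomputed approved-disciplines list: each discipline is decided by a
-- direct scan of lista_aluno for a passing entry (alternative decomposition, same cost class).
def disciplinas_a_pagar (lista_aluno : List (String × Int)) (lista_disciplinas : List String) : List String :=
  let disciplinas_aprovadas :=
    lista_aluno.foldl (fun acc elemento =>
      if elemento.2 ≥ 7 then acc ++ [elemento.1] else acc) []
  lista_disciplinas.foldl (fun acc elemento =>
    if elemento ∉ disciplinas_aprovadas then acc ++ [elemento] else acc) []

-- ===== PORT B =====
def disciplinas_a_pagar_alt (lista_aluno : List (String × Int)) (lista_disciplinas : List String) : List String :=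
  lista_disciplinas.filter (fun d =>
    !(lista_aluno.any (fun a => a.1 == d && decide (a.2 ≥ 7))))

-- ===== PRECONDITION & SPEC =====
def Spec_disciplinas_a_pagar (lista_aluno : List (String × Int)) (lista_disciplinas : List String) (out : List String) : Prop := out = disciplinas_a_pagar_alt lista_aluno lista_disciplinas
instance (lista_aluno : List (String × Int)) (lista_disciplinas : List String) (out : List String) : Decidable (Spec_disciplinas_a_pagar lista_aluno lista_disciplinas out) := by unfold Spec_disciplinas_a_pagar; infer_instance

-- ===== CLAIM (what is proved, stated in full; the proofs are below) =====
def Claim_equal_disciplinas_a_pagar : Prop := ∀ (lista_aluno : List (String × Int)) (lista_disciplinas : List String), Dom_disciplinas_a_pagar lista_aluno lista_disciplinas → Spec_disciplinas_a_pagar lista_aluno lista_disciplinas (disciplinas_a_pagar lista_aluno lista_disciplinas)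

-- ===== LEMMAS AND PROOFS =====

-- ===== VERDICT (by name: the statement is the Claim_ definition above) =====
theorem disciplinas_a_pagar_spec : Claim_equal_disciplinas_a_pagar := by
  intro la ld _
  unfold Spec_disciplinas_a_pagar disciplinas_a_pagar disciplinas_a_pagar_alt
  simp only []
  rw [PySem.List.foldl_append_ite (p := fun e => e.2 ≥ 7) (f := Prod.fst),
    PySem.List.foldl_append_ite_eq_filter]
  simp only [List.nil_append]
  apply List.filter_congr
  intro d _
  rw [Bool.eq_iff_iff]
  simp only [decide_eq_true_iff, Bool.not_eq_true', List.any_eq_false, List.mem_map,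
    List.mem_filter, decide_eq_true_iff, Bool.and_eq_true, beq_iff_eq, not_exists]
  constructor
  · rintro h a ha ⟨h1, h2⟩
    exact h a ⟨⟨ha, h2⟩, h1⟩
  · rintro h a ⟨⟨ha, h7⟩, hx⟩
    exact h a ha ⟨hx, h7⟩
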